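-- pv_equiv track=rewrite | github.com/bhartl/NeurEvo | mindcraft/torch/wrapper/graph/wiring.py | required_for_output
-- ===== SOURCE A (Python) =====
-- def required_for_output(inputs, outputs, connections):
--     """ Adapted from neat-python's neat.graphs under the BSD 3-Clause Licence (Sept. 2021)
--
--     Collect the nodes whose state is required to compute the final wired_rnn output(s).
--     :param inputs: list of the input identifiers
--     :param outputs: list of the output node identifiers
--     :param connections: list of (input, output) connections in the wired_rnn.
--     NOTE: It is assumed that the input identifier set and the node identifier set are disjoint.
--     By convention, the output node ids are always the same as the output index.
--
--     Returns a set of identifiers of required nodes.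
--
--     (c) B. Hartl 2021
--     """
--
--     required = set(outputs)
--     s = set(outputs)
--     while True:
--         # Find nodes not in S whose output is consumed by a node in s.
--         t = set(a for (a, b) in connections if b in s and a not in s)
--
--         if not t:
--             break
--
--         layer_nodes = set(x for x in t if x not in inputs)
--         if not layer_nodes:
--             break
--
--         required = required.union(layer_nodes)
--         s = s.union(t)
--
--     return required
-- ===== SOURCE B (Python) =====
-- def required_for_output(inputs, outputs, connections):
--     """Reverse-adjacency BFS: build a predecessor map once, then expand a
--     frontier layer by layer, looking at each node's predecessor list instead
--     of rescanning the whole connection list every round."""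
--     preds = {}
--     for a, b in connections:
--         preds.setdefault(b, []).append(a)
--     input_set = set(inputs)
--     required = set(outputs)
--     s = set(outputs)
--     frontier = set(outputs)
--     while True:
--         t = {a for b in frontier for a in preds.get(b, ()) if a not in s}
--         if not t:
--             return required
--         layer = t - input_set
--         if not layer:
--             return required
--         required |= layer
--         s |= t
--         frontier = t
-- ===== Notes on version B (the rewrite author's own statement) =====
-- stated objective: faster
-- what changed: B builds a reverse-adjacency (predecessor) dictionary once and expands a frontier layer by layer through each node's predecessor list, so the per-round full rescan of the connection list disappears and each edge is examined only when its destination first becomes reachable.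
import Mathlib
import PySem

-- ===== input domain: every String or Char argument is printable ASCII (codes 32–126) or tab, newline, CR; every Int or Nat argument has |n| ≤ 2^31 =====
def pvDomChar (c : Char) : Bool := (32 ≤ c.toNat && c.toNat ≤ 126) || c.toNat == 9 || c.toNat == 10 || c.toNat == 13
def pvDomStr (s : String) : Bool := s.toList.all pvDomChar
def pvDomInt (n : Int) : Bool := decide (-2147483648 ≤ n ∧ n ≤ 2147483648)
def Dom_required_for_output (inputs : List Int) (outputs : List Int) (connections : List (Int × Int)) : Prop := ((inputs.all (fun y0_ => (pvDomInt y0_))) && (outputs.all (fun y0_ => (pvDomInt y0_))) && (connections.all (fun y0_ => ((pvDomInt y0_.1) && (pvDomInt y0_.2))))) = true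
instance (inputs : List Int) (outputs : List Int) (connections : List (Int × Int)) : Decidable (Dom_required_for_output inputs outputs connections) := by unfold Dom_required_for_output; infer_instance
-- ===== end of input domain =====

-- B builds a reverse-adjacency (predecessor) map once and expands a frontier layer by
-- layer, touching each node's predecessor list instead of rescanning all connections
-- every round (objective: faster). Both Pythons return an unordered set; both ports
-- return its elements as a sorted list (the canonical representation of the set value).

-- ===== PORT A =====
-- A's `while True` loop: s strictly grows by at least one connection source per
-- continuing round, so connections.length + 1 rounds of fuel are never exhausted.
def requiredLoopA (inputs : List Int) (connections : List (Int × Int)) :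
    Nat → PySem.Set Int → PySem.Set Int → PySem.Set Int
  | 0, required, _ => required
  | fuel+1, required, s =>
    -- t = set(a for (a, b) in connections if b in s and a not in s)
    let t : PySem.Set Int :=
      PySem.Set.ofList ((connections.filter
        (fun ab => decide (ab.2 ∈ s) && !decide (ab.1 ∈ s))).map Prod.fst)
    if t = [] then required
    else
      -- layer_nodes = set(x for x in t if x not in inputs)
      let layer : PySem.Set Int := PySem.Set.ofList (t.filter (fun x => !decide (x ∈ inputs)))
      if layer = [] then required
      else requiredLoopA inputs connections fuel
        (PySem.Set.union required layer) (PySem.Set.union s t)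

def required_for_output (inputs : List Int) (outputs : List Int) (connections : List (Int × Int)) : List Int :=
  PySem.List.sorted
    (requiredLoopA inputs connections (connections.length + 1)
      (PySem.Set.ofList outputs) (PySem.Set.ofList outputs))
    (fun x => x) false

-- ===== PORT B =====
-- preds = {}; for a, b in connections: preds.setdefault(b, []).append(a)
def buildPreds (connections : List (Int × Int)) : PySem.Dict Int (List Int) :=
  connections.foldl (fun d ab => d.modify ab.2 [] (fun l => l ++ [ab.1])) PySem.Dict.empty

-- B's `while True` loop over (required, s, frontier)
def requiredLoopB (inputsSet : PySem.Set Int) (preds : PySem.Dict Int (List Int)) :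
    Nat → PySem.Set Int → PySem.Set Int → PySem.Set Int → PySem.Set Int
  | 0, required, _, _ => required
  | fuel+1, required, s, frontier =>
    -- t = {a for b in frontier for a in preds.get(b, ()) if a not in s}
    let t : PySem.Set Int :=
      PySem.Set.ofList ((frontier.flatMap (fun b => preds.getD b [])).filter
        (fun a => !decide (a ∈ s)))
    if t = [] then required
    else
      -- layer = t - input_set
      let layer : PySem.Set Int := PySem.Set.diff t inputsSet
      if layer = [] then required
      else requiredLoopB inputsSet preds fuel
        (PySem.Set.union required layer) (PySem.Set.union s t) t

def required_for_output_alt (inputs : List Int) (outputs : List Int) (connections : List (Int × Int)) : List Int :=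
  PySem.List.sorted
    (requiredLoopB (PySem.Set.ofList inputs) (buildPreds connections) (connections.length + 1)
      (PySem.Set.ofList outputs) (PySem.Set.ofList outputs) (PySem.Set.ofList outputs))
    (fun x => x) false

-- ===== PRECONDITION & SPEC =====
def Spec_required_for_output (inputs : List Int) (outputs : List Int) (connections : List (Int × Int)) (out : List Int) : Prop := out = required_for_output_alt inputs outputs connections
instance (inputs : List Int) (outputs : List Int) (connections : List (Int × Int)) (out : List Int) : Decidable (Spec_required_for_output inputs outputs connections out) := by unfold Spec_required_for_output; infer_instance

-- ===== CLAIM (what is proved, stated in full; the proofs are below) =====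
def Claim_equal_required_for_output : Prop := ∀ (inputs : List Int) (outputs : List Int) (connections : List (Int × Int)), Dom_required_for_output inputs outputs connections → Spec_required_for_output inputs outputs connections (required_for_output inputs outputs connections)

-- ===== LEMMAS AND PROOFS =====

-- the predecessor map is correct: x is listed under b iff (x, b) is a connection
theorem mem_buildPreds_getD (connections : List (Int × Int)) (b x : Int) :
    x ∈ (buildPreds connections).getD b [] ↔ (x, b) ∈ connections := by
  have h : buildPreds connections =
      (connections.map (fun ab => (ab.2, ab.1))).foldl
        (fun d p => d.modify p.1 [] (fun l => l ++ [p.2])) PySem.Dict.empty := by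
    rw [List.foldl_map]; rfl
  rw [h, PySem.Dict.getD_foldl_modify_append]
  simp only [PySem.Dict.getD_empty, List.nil_append, List.mem_map, List.mem_filter,
    List.mem_map]
  constructor
  · rintro ⟨p, ⟨⟨ab, hab, rfl⟩, hb⟩, rfl⟩
    have hb' : ab.2 = b := by simpa using hb
    subst hb'; simpa using hab
  · intro hx
    exact ⟨(b, x), ⟨⟨(x, b), hx, rfl⟩, by simp⟩, rfl⟩

-- the two loops return sets with the same elements (and both Nodup)
theorem loop_same_members (inputs : List Int) (connections : List (Int × Int)) :
    ∀ (fuel : Nat) (reqA sA reqB sB frontier : PySem.Set Int),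
      (∀ x, x ∈ reqA ↔ x ∈ reqB) → reqA.Nodup → reqB.Nodup →
      (∀ x, x ∈ sA ↔ x ∈ sB) →
      (∀ b, b ∈ frontier → b ∈ sB) →
      (∀ a b, (a, b) ∈ connections → b ∈ sB → b ∈ frontier ∨ a ∈ sB) →
      (∀ x, x ∈ requiredLoopA inputs connections fuel reqA sA ↔
            x ∈ requiredLoopB (PySem.Set.ofList inputs) (buildPreds connections) fuel reqB sB frontier) ∧
      (requiredLoopA inputs connections fuel reqA sA).Nodup ∧
      (requiredLoopB (PySem.Set.ofList inputs) (buildPreds connections) fuel reqB sB frontier).Nodup := by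
  intro fuel
  induction fuel with
  | zero => intro reqA sA reqB sB frontier hreq hndA hndB _ _ _; exact ⟨hreq, hndA, hndB⟩
  | succ fuel ih =>
    intro reqA sA reqB sB frontier hreq hndA hndB hs hfs hinv
    rw [requiredLoopA, requiredLoopB]
    set tA : PySem.Set Int := PySem.Set.ofList ((connections.filter
      (fun ab => decide (ab.2 ∈ sA) && !decide (ab.1 ∈ sA))).map Prod.fst) with htA
    set tB : PySem.Set Int := PySem.Set.ofList
      ((frontier.flatMap (fun b => (buildPreds connections).getD b [])).filter
        (fun a => !decide (a ∈ sB))) with htB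
    -- same elements in the two frontiersets t
    have htmem : ∀ x, x ∈ tA ↔ x ∈ tB := by
      intro x
      rw [htA, htB]
      simp only [PySem.Set.mem_ofList, List.mem_map, List.mem_filter, List.mem_flatMap,
        Bool.and_eq_true, Bool.not_eq_eq_eq_not, Bool.not_true, decide_eq_true_eq,
        decide_eq_false_iff_not, mem_buildPreds_getD]
      constructor
      · rintro ⟨ab, ⟨hab, hbs, has⟩, rfl⟩
        have hbsB := (hs ab.2).mp hbs
        have hasB := fun h => has ((hs ab.1).mpr h)
        rcases hinv ab.1 ab.2 (by simpa using hab) hbsB with hf | hcon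
        · exact ⟨⟨ab.2, hf, by simpa using hab⟩, hasB⟩
        · exact absurd hcon hasB
      · rintro ⟨⟨b, hbf, hxb⟩, hxs⟩
        refine ⟨(x, b), ⟨hxb, (hs b).mpr (hfs b hbf), fun h => hxs ((hs x).mp h)⟩, rfl⟩
    have htnil : (tA = []) ↔ (tB = []) := by
      simp only [List.eq_nil_iff_forall_not_mem]
      exact ⟨fun h x hx => h x ((htmem x).mpr hx), fun h x hx => h x ((htmem x).mp hx)⟩
    by_cases hAe : tA = []
    · simp [hAe, htnil.mp hAe, hreq, hndA, hndB]
    · have hBe : ¬ tB = [] := fun h => hAe (htnil.mpr h)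
      simp only [hAe, hBe, if_false]
      set layerA : PySem.Set Int :=
        PySem.Set.ofList (tA.filter (fun x => !decide (x ∈ inputs))) with hlA
      set layerB : PySem.Set Int := PySem.Set.diff tB (PySem.Set.ofList inputs) with hlB
      have hndtB : tB.Nodup := PySem.Set.nodup_ofList _
      have hlmem : ∀ x, x ∈ layerA ↔ x ∈ layerB := by
        intro x
        rw [hlA, hlB, PySem.Set.mem_diff]
        simp only [PySem.Set.mem_ofList, List.mem_filter, Bool.not_eq_eq_eq_not,
          Bool.not_true, decide_eq_false_iff_not]
        constructor
        · rintro ⟨hx, hni⟩; exact ⟨(htmem x).mp hx, by simpa using hni⟩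
        · rintro ⟨hx, hni⟩; exact ⟨(htmem x).mpr hx, by simpa using hni⟩
      have hlnil : (layerA = []) ↔ (layerB = []) := by
        simp only [List.eq_nil_iff_forall_not_mem]
        exact ⟨fun h x hx => h x ((hlmem x).mpr hx), fun h x hx => h x ((hlmem x).mp hx)⟩
      by_cases hlAe : layerA = []
      · simp [hlAe, hlnil.mp hlAe, hreq, hndA, hndB]
      · have hlBe : ¬ layerB = [] := fun h => hlAe (hlnil.mpr h)
        simp only [hlAe, hlBe, if_false]
        apply ih
        · intro x
          rw [PySem.Set.mem_union, PySem.Set.mem_union]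
          exact or_congr (hreq x) (hlmem x)
        · exact PySem.Set.nodup_union _ _ hndA
        · exact PySem.Set.nodup_union _ _ hndB
        · intro x
          rw [PySem.Set.mem_union, PySem.Set.mem_union]
          exact or_congr (hs x) (htmem x)
        · intro b hb
          rw [PySem.Set.mem_union]; exact Or.inr hb
        · intro a b hab hb
          rw [PySem.Set.mem_union] at hb
          rcases hb with hbs | hbt
          · rcases hinv a b hab hbs with hf | has
            · by_cases haB : a ∈ sB
              · exact Or.inr (by rw [PySem.Set.mem_union]; exact Or.inl haB)
              · refine Or.inr (by
                  rw [PySem.Set.mem_union]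
                  refine Or.inr ?_
                  rw [htB, PySem.Set.mem_ofList, List.mem_filter]
                  exact ⟨List.mem_flatMap.mpr ⟨b, hf,
                    (mem_buildPreds_getD connections b a).mpr hab⟩, by simpa using haB⟩)
            · exact Or.inr (by rw [PySem.Set.mem_union]; exact Or.inl has)
          · exact Or.inl hbt

-- ===== VERDICT (by name: the statement is the Claim_ definition above) =====
theorem required_for_output_spec : Claim_equal_required_for_output := by
  intro inputs outputs connections _
  unfold Spec_required_for_output required_for_output required_for_output_alt
  obtain ⟨hmem, hndA, hndB⟩ :=
    loop_same_members inputs connections (connections.length + 1)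
      (PySem.Set.ofList outputs) (PySem.Set.ofList outputs)
      (PySem.Set.ofList outputs) (PySem.Set.ofList outputs) (PySem.Set.ofList outputs)
      (fun _ => Iff.rfl) (PySem.Set.nodup_ofList _) (PySem.Set.nodup_ofList _)
      (fun _ => Iff.rfl) (fun _ h => h)
      (fun a b _ hb => Or.inl hb)
  exact PySem.List.sorted_eq_sorted_of_perm _ _ _ (fun _ _ h => h)
    ((List.perm_ext_iff_of_nodup hndA hndB).mpr hmem)
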